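-- pv_equiv track=rewrite | github.com/diegodpgs/Compilers | Syntatic/utils.py | splitProduction
-- ===== SOURCE A (Python) =====
-- def splitProduction(production,noterminals):
-- 	"""
-- 		All noterminais have to be UPPERCASE
-- 		all terminals   have to be lowercase
--
-- 		Example
--
-- 		NT = ['A','B','CD']
-- 		INPUT : splitProduction('AabCDdeFGh')
-- 		OUTPUT: ['A','ab','CD','deF','G','h']
--
-- 	"""
-- 	index = 0
-- 	production_splited = []
--
-- 	while index < len(production):
--
-- 		buffer_production = ''
--
-- 		while index < len(production) and production[index].isupper():
-- 			buffer_production += production[index]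
-- 			index += 1
--
-- 		if len(buffer_production) > 0:
-- 			production_splited.append(buffer_production)
-- 			buffer_production = ''
--
-- 		while index < len(production) and production[index].islower():
-- 			buffer_production += production[index]
-- 			index += 1
--
-- 		if len(buffer_production) > 0:
-- 			production_splited.append(buffer_production)
--
-- 		if buffer_production == '':
-- 			index += 1
--
-- 	return production_splited
-- ===== SOURCE B (Python) =====
-- def splitProduction(production, noterminals):
--     def cls(c):
--         return 'U' if c.isupper() else ('L' if c.islower() else 'O')
--     tokens = []
--     i, n = 0, len(production)
--     while i < n:
--         k = cls(production[i])
--         j = i + 1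
--         while j < n and cls(production[j]) == k:
--             j += 1
--         if k != 'O':
--             tokens.append(production[i:j])
--         i = j
--     return tokens
-- ===== Notes on version B (the rewrite author's own statement) =====
-- stated objective: simpler
-- what changed: replaces A's alternating upper-run/lower-run inner while-loops plus skip-on-empty bookkeeping by a single uniform run scanner over a three-way character class (U/L/O) that slices each cased run out at once (avoiding A's per-character string concatenation, quadratic on long runs) and drops non-cased runs
import Mathlib
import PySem

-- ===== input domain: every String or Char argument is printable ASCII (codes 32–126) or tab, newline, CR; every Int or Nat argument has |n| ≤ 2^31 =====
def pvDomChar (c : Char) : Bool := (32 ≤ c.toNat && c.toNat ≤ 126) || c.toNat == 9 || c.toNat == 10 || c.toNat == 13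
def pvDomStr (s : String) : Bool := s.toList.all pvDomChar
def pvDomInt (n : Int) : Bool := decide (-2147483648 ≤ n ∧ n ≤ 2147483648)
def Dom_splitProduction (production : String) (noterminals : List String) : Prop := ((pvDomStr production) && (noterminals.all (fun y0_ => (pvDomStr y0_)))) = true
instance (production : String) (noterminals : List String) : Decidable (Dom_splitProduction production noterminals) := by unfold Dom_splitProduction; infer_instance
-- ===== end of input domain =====

-- B replaces A's alternating upper-run/lower-run inner while-loops (with skip-on-empty bookkeeping)
-- by one uniform run scanner over a three-way character class; objective: simpler.
-- (noterminals is unused by both programs, exactly as in the Python.)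

-- termination helper cited by both ports' decreasing_by (dropping a satisfied head shortens the list)
theorem pv_dropWhile_lt {α : Type} (p : α → Bool) (l : List α)
    (h : 0 < (l.takeWhile p).length) : (l.dropWhile p).length < l.length := by
  cases l with
  | nil => simp at h
  | cons d t =>
    by_cases hp : p d
    · have := List.length_dropWhile_le (p := p) (l := t)
      simp [hp]
      omega
    · simp [hp] at h

-- ===== PORT A =====
-- A's outer while over the index; the two inner while-loops collecting an uppercase run and then a
-- lowercase run are takeWhile/dropWhile pairs; 'if buffer == "": index += 1' is the .tail step.
def splitProductionGoA (cs : List Char) : List String :=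
  match cs with
  | [] => []
  | c :: rest =>
    let bu := (c :: rest).takeWhile Char.isUpper
    let r1 := (c :: rest).dropWhile Char.isUpper
    let bl := r1.takeWhile Char.isLower
    let r2 := r1.dropWhile Char.isLower
    if bl.length > 0 then
      (if bu.length > 0 then [String.ofList bu] else []) ++ [String.ofList bl] ++ splitProductionGoA r2
    else
      (if bu.length > 0 then [String.ofList bu] else []) ++ splitProductionGoA r1.tail
termination_by cs.length
decreasing_by
  · rename_i hbl
    have h1 := List.length_dropWhile_le (p := Char.isUpper) (l := c :: rest)
    have h2 := pv_dropWhile_lt Char.isLower ((c :: rest).dropWhile Char.isUpper) (by simpa using hbl)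
    simp at h1 ⊢
    omega
  · by_cases hp : Char.isUpper c
    · have h2 := pv_dropWhile_lt Char.isUpper (c :: rest) (by simp [hp])
      simp at h2 ⊢
      omega
    · simp [hp]

def splitProduction (production : String) (_noterminals : List String) : List String :=
  splitProductionGoA production.toList

-- ===== PORT B =====
-- Source B: cls classifies a char as 'U'/'L'/'O'; the scanner takes the run of the head's class
-- (the inner j-loop; the slice production[i:j] is c :: g) and keeps it unless the class is 'O'.
def pvCls (c : Char) : Char :=
  if c.isUpper then 'U' else if c.isLower then 'L' else 'O'

def splitProductionGoB (cs : List Char) : List String :=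
  match cs with
  | [] => []
  | c :: rest =>
    let k := pvCls c
    let g := rest.takeWhile (fun x => pvCls x == k)
    let r := rest.dropWhile (fun x => pvCls x == k)
    (if k ≠ 'O' then [String.ofList (c :: g)] else []) ++ splitProductionGoB r
termination_by cs.length
decreasing_by
  have := List.length_dropWhile_le (p := fun x => pvCls x == pvCls c) (l := rest)
  simp at this ⊢
  omega

def splitProduction_alt (production : String) (_noterminals : List String) : List String :=
  splitProductionGoB production.toList

-- ===== PRECONDITION & SPEC =====
def Spec_splitProduction (production : String) (noterminals : List String) (out : List String) : Prop := out = splitProduction_alt production noterminals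
instance (production : String) (noterminals : List String) (out : List String) : Decidable (Spec_splitProduction production noterminals out) := by unfold Spec_splitProduction; infer_instance

-- ===== CLAIM (what is proved, stated in full; the proofs are below) =====
def Claim_equal_splitProduction : Prop := ∀ (production : String) (noterminals : List String), Dom_splitProduction production noterminals → Spec_splitProduction production noterminals (splitProduction production noterminals)

-- ===== LEMMAS AND PROOFS =====

theorem pv_upper_not_lower (c : Char) (h : c.isUpper = true) : c.isLower = false := by
  simp [Char.isUpper, Char.isLower, UInt32.le_iff_toNat_le] at *
  omega

theorem pv_clsU (x : Char) : (pvCls x == 'U') = x.isUpper := by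
  by_cases hu : x.isUpper <;> by_cases hl : x.isLower <;> simp [pvCls, hu, hl]

theorem pv_clsL (x : Char) : (pvCls x == 'L') = x.isLower := by
  by_cases hu : x.isUpper
  · simp [pvCls, hu, pv_upper_not_lower x hu]
  · by_cases hl : x.isLower <;> simp [pvCls, hu, hl]

theorem pv_dropWhile_head {α : Type} (p : α → Bool) (l : List α) (d : α) (t : List α)
    (h : l.dropWhile p = d :: t) : p d = false := by
  have := List.head_dropWhile_not p (l := l) (by simp [h])
  simpa [h] using this

theorem pv_bGo_dropO (cs : List Char) :
    splitProductionGoB (cs.dropWhile (fun x => pvCls x == 'O')) = splitProductionGoB cs := by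
  induction cs with
  | nil => rfl
  | cons c cs ih =>
    by_cases hc : pvCls c = 'O'
    · rw [List.dropWhile_cons_of_pos (by simp [hc])]
      rw [ih]
      conv_rhs => rw [splitProductionGoB]
      simp [hc, ih]
    · rw [List.dropWhile_cons_of_neg (by simp [hc])]

theorem pv_bGo_consO (c : Char) (cs : List Char) (h : pvCls c = 'O') :
    splitProductionGoB (c :: cs) = splitProductionGoB cs := by
  rw [splitProductionGoB]
  simp [h]
  exact pv_bGo_dropO cs

theorem pv_main_aux : ∀ n : Nat, ∀ cs : List Char, cs.length ≤ n →
    splitProductionGoA cs = splitProductionGoB cs := by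
  intro n
  induction n with
  | zero =>
    intro cs h
    have : cs = [] := List.eq_nil_of_length_eq_zero (Nat.le_zero.mp h)
    subst this
    rw [splitProductionGoA, splitProductionGoB]
  | succ n ih =>
    intro cs h
    match cs with
    | [] => rw [splitProductionGoA, splitProductionGoB]
    | c :: rest =>
      have hlen : rest.length ≤ n := by simpa using h
      rw [splitProductionGoA, splitProductionGoB]
      by_cases hu : c.isUpper
      · -- uppercase head: both emit the uppercase run
        have hk : pvCls c = 'U' := by simp [pvCls, hu]
        cases hr1 : rest.dropWhile Char.isUpper with
        | nil =>
          simp only [hk, hr1, pv_clsU, List.takeWhile_cons_of_pos hu,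
            List.dropWhile_cons_of_pos hu]
          rw [splitProductionGoA.eq_def, splitProductionGoB.eq_def]
          simp [splitProductionGoA.eq_def]
        | cons d r1' =>
          have hdU : d.isUpper = false := pv_dropWhile_head _ _ _ _ hr1
          have hr1'len : r1'.length < rest.length := by
            have := List.length_dropWhile_le (p := Char.isUpper) (l := rest)
            rw [hr1] at this; simp at this; omega
          by_cases hdl : d.isLower
          · -- lowercase run follows the uppercase run
            have hB : splitProductionGoB (d :: r1') =
                String.ofList (d :: r1'.takeWhile Char.isLower) ::
                  splitProductionGoB (r1'.dropWhile Char.isLower) := by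
              rw [splitProductionGoB]
              have hkd : pvCls d = 'L' := by simp [pvCls, hdU, hdl]
              simp only [hkd, pv_clsL]
              simp
            have hr2len : (r1'.dropWhile Char.isLower).length ≤ n := by
              have := List.length_dropWhile_le (p := Char.isLower) (l := r1')
              omega
            simp only [hk, pv_clsU, List.takeWhile_cons_of_pos hu,
              List.dropWhile_cons_of_pos hu, hr1, hB]
            simp [hdl, ih _ hr2len]
          · -- non-cased char after the run: A skips it, B drops its 'O'-group head
            have hdO : pvCls d = 'O' := by simp [pvCls, hdU, hdl]
            simp only [hk, pv_clsU, List.takeWhile_cons_of_pos hu,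
              List.dropWhile_cons_of_pos hu, hr1, pv_bGo_consO d r1' hdO]
            simp [hdl, ih _ (le_of_lt (lt_of_lt_of_le hr1'len hlen))]
      · by_cases hl : c.isLower
        · -- lowercase head: no uppercase token, both emit the lowercase run
          have hk : pvCls c = 'L' := by simp [pvCls, hu, hl]
          have hr2len : (rest.dropWhile Char.isLower).length ≤ n := by
            have := List.length_dropWhile_le (p := Char.isLower) (l := rest)
            omega
          have hcu : Char.isUpper c = false := by simpa using hu
          simp only [hk, pv_clsL]
          simp [hcu, hl, ih _ hr2len]
        · -- non-cased head: A skips one char, B drops the 'O' group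
          have hcO : pvCls c = 'O' := by simp [pvCls, hu, hl]
          have hB : splitProductionGoB (c :: rest) = splitProductionGoB rest :=
            pv_bGo_consO c rest hcO
          rw [splitProductionGoB] at hB
          have hcu : Char.isUpper c = false := by simpa using hu
          have hcl : Char.isLower c = false := by simpa using hl
          simp only [hcO] at hB ⊢
          simp [hcu, hcl] at hB ⊢
          rw [hB]
          exact ih _ hlen

theorem pv_main_go (cs : List Char) : splitProductionGoA cs = splitProductionGoB cs :=
  pv_main_aux cs.length cs le_rfl

-- ===== VERDICT (by name: the statement is the Claim_ definition above) =====
theorem splitProduction_spec : Claim_equal_splitProduction := by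
  intro p nt _
  unfold Spec_splitProduction splitProduction splitProduction_alt
  exact pv_main_go p.toList
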